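-- pv_equiv track=rewrite | github.com/FokaKefir/DiszkretMatekPython | lab03/lab03.py | positionRationalNumberInList1
-- ===== SOURCE A (Python) =====
-- def positionRationalNumberInList1(num):
--     i = 1
--     pos = 1
--     while True:
--         for j in range(1, i + 1):
--             if num == (j, i - j + 1):
--                 return pos
--             pos += 1
--         i += 1
-- ===== SOURCE B (Python) =====
-- def positionRationalNumberInList1(num):
--     # Closed form for the Cantor diagonal enumeration:
--     # (a, b) sits on diagonal i = a + b - 1, which starts at position
--     # 1 + (i-1)*i//2, and (a, b) is the a-th entry of that diagonal.
--     a, b = num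
--     i = a + b - 1
--     return 1 + (i - 1) * i // 2 + (a - 1)
-- ===== Notes on version B (the rewrite author's own statement) =====
-- stated objective: faster
-- what changed: Replaces the nested enumeration loop (scan all diagonals up to a+b-1) with the closed-form triangular-number formula pos = 1 + (i-1)*i//2 + (a-1) with i = a+b-1.
import Mathlib
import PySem

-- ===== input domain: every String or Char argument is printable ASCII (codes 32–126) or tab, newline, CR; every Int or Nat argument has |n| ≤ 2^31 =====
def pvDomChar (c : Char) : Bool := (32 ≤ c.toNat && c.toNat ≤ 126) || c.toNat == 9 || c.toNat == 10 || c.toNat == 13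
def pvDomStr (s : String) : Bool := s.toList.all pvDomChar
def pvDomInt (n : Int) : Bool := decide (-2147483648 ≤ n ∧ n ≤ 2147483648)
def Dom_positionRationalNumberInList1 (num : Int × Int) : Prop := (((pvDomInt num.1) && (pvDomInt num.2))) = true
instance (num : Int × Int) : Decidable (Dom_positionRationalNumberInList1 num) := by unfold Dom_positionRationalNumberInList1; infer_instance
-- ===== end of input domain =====

-- B replaces A's diagonal-by-diagonal scan with the closed-form triangular-number formula (objective: faster, proved equal on Pre_).


-- ===== PORT A =====
-- inner 'for j in range(1, i+1)' loop: some pos = early return, (none, pos) = fell through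
def pvInnerA (num : Int × Int) (i : Int) : List Int → Int → Option Int × Int
  | [], pos => (none, pos)
  | j :: js, pos =>
    if num = (j, i - j + 1) then (some pos, pos) else pvInnerA num i js (pos + 1)

-- outer 'while True' loop; the fuel only makes the recursion total (under Pre_ it never runs out)
def pvOuterA (num : Int × Int) : Int → Int → Nat → Int
  | _, _, 0 => 0
  | i, pos, fuel + 1 =>
    match pvInnerA num i (PySem.List.pyRange 1 (i + 1) 1) pos with
    | (some p, _) => p
    | (none, pos') => pvOuterA num (i + 1) pos' fuel

def positionRationalNumberInList1 (num : Int × Int) : Int :=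
  pvOuterA num 1 1 (num.1 + num.2).toNat

-- ===== PORT B =====
def positionRationalNumberInList1_alt (num : Int × Int) : Int :=
  let a := num.1
  let b := num.2
  let i := a + b - 1
  1 + PySem.Int.floordiv ((i - 1) * i) 2 + (a - 1)

-- ===== PRECONDITION & SPEC =====
-- A returns only when num is a pair of two positive ints (otherwise the while-True loop never finds num and diverges)
def Pre_positionRationalNumberInList1 (num : Int × Int) : Prop := 1 ≤ num.1 ∧ 1 ≤ num.2
instance (num : Int × Int) : Decidable (Pre_positionRationalNumberInList1 num) := by unfold Pre_positionRationalNumberInList1; infer_instance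
def pvWitness_positionRationalNumberInList1 : (Int × Int) := (3, 2)

def Spec_positionRationalNumberInList1 (num : Int × Int) (out : Int) : Prop := out = positionRationalNumberInList1_alt num
instance (num : Int × Int) (out : Int) : Decidable (Spec_positionRationalNumberInList1 num out) := by unfold Spec_positionRationalNumberInList1; infer_instance

-- ===== CLAIM (what is proved, stated in full; the proofs are below) =====
def Claim_equal_positionRationalNumberInList1 : Prop := ∀ (num : Int × Int), Dom_positionRationalNumberInList1 num → Pre_positionRationalNumberInList1 num → Spec_positionRationalNumberInList1 num (positionRationalNumberInList1 num)

-- ===== LEMMAS AND PROOFS =====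

-- the inner loop misses every j when the diagonal is wrong
theorem pvInnerA_miss (a b i : Int) (h : i ≠ a + b - 1) :
    ∀ (js : List Int) (pos : Int), pvInnerA (a, b) i js pos = (none, pos + js.length) := by
  intro js
  induction js with
  | nil => intro pos; simp [pvInnerA]
  | cons j js ih =>
    intro pos
    have hne : (a, b) ≠ (j, i - j + 1) := by
      intro hEq
      apply h
      have h1 : a = j := congrArg Prod.fst hEq
      have h2 : b = i - j + 1 := congrArg Prod.snd hEq
      omega
    simp only [pvInnerA, if_neg hne, ih, List.length_cons]
    congr 1
    push_cast
    ring

-- skipping a missing prefix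
theorem pvInnerA_append (a b i : Int) (l1 l2 : List Int)
    (h : ∀ j ∈ l1, (a, b) ≠ (j, i - j + 1)) (pos : Int) :
    pvInnerA (a, b) i (l1 ++ l2) pos = pvInnerA (a, b) i l2 (pos + l1.length) := by
  induction l1 generalizing pos with
  | nil => simp
  | cons j l1 ih =>
    have hne := h j (by simp)
    simp only [List.cons_append, pvInnerA, if_neg hne]
    rw [ih (fun x hx => h x (by simp [hx]))]
    congr 1
    simp
    omega

-- the inner loop on the right diagonal finds num at the (a-1)-st step
theorem pvInnerA_hit (a b : Int) (ha : 1 ≤ a) (hb : 1 ≤ b) (pos : Int) :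
    pvInnerA (a, b) (a + b - 1) (PySem.List.pyRange 1 (a + b) 1) pos
      = (some (pos + (a - 1)), pos + (a - 1)) := by
  have hsplit : PySem.List.pyRange 1 (a + b) 1
      = PySem.List.pyRange 1 a 1 ++ PySem.List.pyRange a (a + b) 1 :=
    PySem.List.pyRange_one_append 1 a (a + b) (by omega) (by omega)
  rw [hsplit, pvInnerA_append (a := a) (b := b)]
  · have hcons : PySem.List.pyRange a (a + b) 1 = a :: PySem.List.pyRange (a + 1) (a + b) 1 :=
      PySem.List.pyRange_one_cons (by omega)
    rw [hcons]
    have hlen : ((PySem.List.pyRange 1 a 1).length : Int) = a - 1 := by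
      rw [PySem.List.length_pyRange_one]; omega
    have hb' : a + b - 1 - a + 1 = b := by omega
    simp only [pvInnerA, hb', hlen, if_true]
  · intro j hj hEq
    have hmem := (PySem.List.mem_pyRange_one).mp hj
    have h1 : a = j := congrArg Prod.fst hEq
    omega

-- the outer loop: 2×(result) in closed form, by induction on the distance to the target diagonal
theorem pvOuterA_closed (a b : Int) (ha : 1 ≤ a) (hb : 1 ≤ b) :
    ∀ (n : Nat) (i pos : Int) (fuel : Nat), 1 ≤ i → i + n = a + b - 1 → n < fuel →
      2 * pvOuterA (a, b) i pos fuel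
        = 2 * pos + (a + b - 1 - i) * (a + b - 1 + i - 1) + 2 * (a - 1) := by
  intro n
  induction n with
  | zero =>
    intro i pos fuel hi hdiag hfuel
    obtain ⟨fuel, rfl⟩ : ∃ f, fuel = f + 1 := ⟨fuel - 1, by omega⟩
    have hi' : i = a + b - 1 := by omega
    subst hi'
    have h1 : a + b - 1 + 1 = a + b := by omega
    have hred : pvOuterA (a, b) (a + b - 1) pos (fuel + 1) = pos + (a - 1) := by
      rw [pvOuterA, h1, pvInnerA_hit a b ha hb]
    rw [hred]
    ring_nf
  | succ n ih =>
    intro i pos fuel hi hdiag hfuel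
    obtain ⟨fuel, rfl⟩ : ∃ f, fuel = f + 1 := ⟨fuel - 1, by omega⟩
    have hne : i ≠ a + b - 1 := by omega
    have hlen : ((PySem.List.pyRange 1 (i + 1) 1).length : Int) = i := by
      rw [PySem.List.length_pyRange_one]; omega
    have hred : pvOuterA (a, b) i pos (fuel + 1)
        = pvOuterA (a, b) (i + 1) (pos + i) fuel := by
      rw [pvOuterA, pvInnerA_miss a b i hne, hlen]
    rw [hred, ih (i + 1) (pos + i) fuel (by omega) (by omega) (by omega)]
    ring

-- ===== VERDICT (by name: the statement is the Claim_ definition above) =====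
theorem positionRationalNumberInList1_spec : Claim_equal_positionRationalNumberInList1 := by
  intro num _ hpre
  obtain ⟨a, b⟩ := num
  obtain ⟨ha, hb⟩ := hpre
  show positionRationalNumberInList1 (a, b) = positionRationalNumberInList1_alt (a, b)
  have hmain := pvOuterA_closed a b ha hb (a + b - 2).toNat 1 1 (a + b).toNat
    (by omega) (by omega) (by omega)
  have hA : 2 * positionRationalNumberInList1 (a, b)
      = 2 + (a + b - 2) * (a + b - 1) + 2 * (a - 1) := by
    unfold positionRationalNumberInList1
    simp only at hmain
    rw [hmain]; ring_nf
  -- B: the floor-division is exact because (i-1)*i is a product of consecutive integers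
  have hB : 2 * positionRationalNumberInList1_alt (a, b)
      = 2 + (a + b - 2) * (a + b - 1) + 2 * (a - 1) := by
    unfold positionRationalNumberInList1_alt
    simp only
    have hdvd : (2 : Int) ∣ (a + b - 1 - 1) * (a + b - 1) := by
      rcases Int.even_or_odd (a + b) with ⟨k, hk⟩ | ⟨k, hk⟩
      · exact ⟨(k - 1) * (k + k - 1), by rw [hk]; ring⟩
      · exact ⟨(2 * k - 1) * k, by rw [hk]; ring⟩
    obtain ⟨k, hk⟩ := hdvd
    rw [PySem.Int.floordiv_eq_ediv_of_pos (by norm_num), hk,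
      Int.mul_ediv_cancel_left _ (by norm_num : (2:Int) ≠ 0)]
    have h2 : (a + b - 2) * (a + b - 1) = 2 * k := by rw [← hk]; ring
    omega

  omega
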